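-- pv_equiv track=rewrite | github.com/mitchklusty/Cryptography | AES/aes.py | inverse_byte_sub_matrix_mul
-- ===== SOURCE A (Python) =====
-- def xor(a, b):
-- 	if type(a) is list:
-- 		if type(b) is list:
-- 			return [a[i] ^ b[i] for i in range(len(a))]
-- 		return [a[i] ^ b for i in range(len(a))]
-- 	elif type(b) is list:
-- 		return [a ^ b[i] for i in range(len(b))]
-- 	return a ^ b
--
-- def gf_mpy(x, y):                  # mpy two 8 bit values
-- 	p = 0b100011011             # mpy modulo x^8+x^4+x^3+x+1
-- 	m = 0                       # m will be product
-- 	for i in range(8):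
-- 		m = m << 1
-- 		if m & 0b100000000:
-- 			m = m ^ p
-- 		if y & 0b010000000:
-- 			m = m ^ x
-- 		y = y << 1
-- 	return m
--
-- def bin_array_to_int(bin_array):
-- 	output = 0
-- 	for i in range(len(bin_array)):
-- 		output = output | (bin_array[i] << (len(bin_array)-1-i))
-- 	return output
--
-- def inverse_byte_sub_matrix_mul(number):
-- 	binary = '{:08b}'.format(number)
-- 	bin_array = [int(binary[i]) for i in range(len(binary)-1, -1, -1)]
-- 	m=[
-- 	[0, 0, 1, 0, 0, 1, 0, 1],
-- 	[1, 0, 0, 1, 0, 0, 1, 0],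
-- 	[0, 1, 0, 0, 1, 0, 0, 1],
-- 	[1, 0, 1, 0, 0, 1, 0, 0],
-- 	[0, 1, 0, 1, 0, 0, 1, 0],
-- 	[0, 0, 1, 0, 1, 0, 0, 1],
-- 	[1, 0, 0, 1, 0, 1, 0, 0],
-- 	[0, 1, 0, 0, 1, 0, 1, 0]]
-- 	b = [1, 1, 0, 0, 0, 1, 1, 0]
-- 	bin_output = []
-- 	for i in range(len(bin_array)):
-- 		bin_array[i] = bin_array[i] ^ b[i]
-- 	for i in range(len(m)):
-- 		bin_num = 0
-- 		for j in range(len(bin_array)):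
-- 			bin_num = xor(bin_num, gf_mpy(m[i][j], bin_array[j]))
-- 		bin_output.append(bin_num)
--
-- 	bin_output.reverse()
-- 	return bin_array_to_int(bin_output)
-- ===== SOURCE B (Python) =====
-- # B: closed-form AES inverse affine transform: rotate-and-xor instead of bit-array + GF(2) matrix multiply.
-- def inverse_byte_sub_matrix_mul(number):
-- 	x = number & 0xFF
-- 	def rol(v, n):
-- 		return ((v << n) | (v >> (8 - n))) & 0xFF
-- 	return rol(x, 1) ^ rol(x, 3) ^ rol(x, 6) ^ 0x05
-- ===== Notes on version B (the rewrite author's own statement) =====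
-- stated objective: idiomatic
-- what changed: Replaces the binary-string/bit-array construction and 8x8 GF(2) matrix multiply with the standard closed-form inverse affine: rol(x,1) ^ rol(x,3) ^ rol(x,6) ^ 0x05 on the masked byte.
import Mathlib
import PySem

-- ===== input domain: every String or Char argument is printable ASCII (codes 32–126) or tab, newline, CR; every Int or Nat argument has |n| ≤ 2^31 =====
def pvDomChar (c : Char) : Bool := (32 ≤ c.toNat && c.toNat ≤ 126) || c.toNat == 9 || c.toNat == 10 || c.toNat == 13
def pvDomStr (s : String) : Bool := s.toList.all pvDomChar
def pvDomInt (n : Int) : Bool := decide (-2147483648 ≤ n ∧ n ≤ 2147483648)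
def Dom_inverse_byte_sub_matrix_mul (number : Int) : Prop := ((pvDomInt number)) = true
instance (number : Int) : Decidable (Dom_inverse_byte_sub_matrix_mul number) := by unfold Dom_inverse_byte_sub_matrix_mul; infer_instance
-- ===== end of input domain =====

-- B replaces A's binary-string/bit-array + 8x8 GF(2) matrix multiply with the closed-form rotate-and-xor inverse affine; objective: idiomatic.


-- ===== PORT A =====
-- NOTE on bit operations: every value A ever applies &, |, ^ or << to is nonnegative under Pre_
-- (bits 0/1, gf_mpy state, accumulators), so the ports below compute them on Nat (Python-exact there).
-- xor helper of A; only the int/int branch is ever reached at the single call site (both arguments are ints), so only it is ported.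
def pvXorII (a b : Int) : Int := (a.toNat ^^^ b.toNat : Nat)

-- gf_mpy: the 8-iteration shift/xor loop over state (m, y); 'm << 1'/'y << 1' are m*2/y*2 (exact: Python << on ints).
def pvGfMpy (x y : Int) : Int :=
  (((List.range 8).foldl (fun (my : Nat × Nat) _ =>
      let m := my.1 <<< 1
      let m := if m &&& 256 ≠ 0 then m ^^^ 283 else m
      let m := if my.2 &&& 128 ≠ 0 then m ^^^ x.toNat else m
      (m, my.2 <<< 1)) (0, y.toNat)).1 : Nat)

-- bin_array_to_int: fold over indices, 'bin_array[i] << (len-1-i)' is multiplication by 2^(len-1-i) (exact: entries nonneg under Pre_).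
def pvBinArrayToInt (xs : List Int) : Int :=
  (List.range xs.length).foldl
    (fun out i =>
      let e : Nat := xs.length - 1 - i
      ((out.toNat ||| ((PySem.List.pyGetD xs (i : Int) 0).toNat <<< e) : Nat) : Int)) 0

-- hand port of '{:08b}'.format(n): binary digits MSB-first, zero-padded to width 8; exact for 0 ≤ n (Pre_ guarantees it).
def pvNatBitsGo : Nat → Nat → List Int
  | _, 0 => []
  | 0, _ => []                                   -- unreachable: fuel ≥ value
  | fuel + 1, m + 1 => pvNatBitsGo fuel ((m + 1) / 2) ++ [(((m + 1) % 2 : Nat) : Int)]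
def pvNatBits (n : Nat) : List Int := pvNatBitsGo n n
def pvFmt08b (n : Int) : List Int :=
  let ds := pvNatBits n.toNat
  List.replicate (8 - ds.length) 0 ++ ds

def inverse_byte_sub_matrix_mul (number : Int) : Int :=
  let binary := pvFmt08b number
  -- [int(binary[i]) for i in range(len(binary)-1, -1, -1)]
  let bin_array := binary.reverse
  let m : List (List Int) :=
    [[0, 0, 1, 0, 0, 1, 0, 1],
     [1, 0, 0, 1, 0, 0, 1, 0],
     [0, 1, 0, 0, 1, 0, 0, 1],
     [1, 0, 1, 0, 0, 1, 0, 0],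
     [0, 1, 0, 1, 0, 0, 1, 0],
     [0, 0, 1, 0, 1, 0, 0, 1],
     [1, 0, 0, 1, 0, 1, 0, 0],
     [0, 1, 0, 0, 1, 0, 1, 0]]
  let b : List Int := [1, 1, 0, 0, 0, 1, 1, 0]
  -- for i in range(len(bin_array)): bin_array[i] = bin_array[i] ^ b[i]   (b[i] in range under Pre_)
  let bin_array := (List.range bin_array.length).map
    (fun i => pvXorII (PySem.List.pyGetD bin_array (i : Int) 0) (PySem.List.pyGetD b (i : Int) 0))
  -- for i in range(len(m)): inner fold accumulating bin_num, appended to bin_output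
  let bin_output := (List.range m.length).foldl
    (fun acc i =>
      acc ++ [(List.range bin_array.length).foldl
        (fun bin_num j =>
          pvXorII bin_num
            (pvGfMpy (PySem.List.pyGetD (PySem.List.pyGetD m (i : Int) []) (j : Int) 0)
                     (PySem.List.pyGetD bin_array (j : Int) 0))) 0]) []
  pvBinArrayToInt bin_output.reverse

-- ===== PORT B =====
-- rol(v, n) = ((v << n) | (v >> (8 - n))) & 0xFF; v is always 'number & 0xFF' so nonneg, shifts via Nat are exact.
def pvRol (v : Int) (n : Nat) : Int :=
  (((v.toNat <<< n) ||| (v.toNat >>> (8 - n))) &&& 255 : Nat)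

def inverse_byte_sub_matrix_mul_alt (number : Int) : Int :=
  let x := PySem.Int.band number 255
  PySem.Int.bxor (PySem.Int.bxor (PySem.Int.bxor (pvRol x 1) (pvRol x 3)) (pvRol x 6)) 5

-- ===== PRECONDITION & SPEC =====
-- Pre_ excludes exactly the inputs where A raises: number < 0 (ValueError from int('-')) and number > 255 (IndexError on b[i]).
def Pre_inverse_byte_sub_matrix_mul (number : Int) : Prop := 0 ≤ number ∧ number ≤ 255
instance (number : Int) : Decidable (Pre_inverse_byte_sub_matrix_mul number) := by
  unfold Pre_inverse_byte_sub_matrix_mul; infer_instance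
def pvWitness_inverse_byte_sub_matrix_mul : Int := (99)

def Spec_inverse_byte_sub_matrix_mul (number : Int) (out : Int) : Prop := out = inverse_byte_sub_matrix_mul_alt number
instance (number : Int) (out : Int) : Decidable (Spec_inverse_byte_sub_matrix_mul number out) := by unfold Spec_inverse_byte_sub_matrix_mul; infer_instance

-- ===== CLAIM (what is proved, stated in full; the proofs are below) =====
def Claim_equal_inverse_byte_sub_matrix_mul : Prop := ∀ (number : Int), Dom_inverse_byte_sub_matrix_mul number → Pre_inverse_byte_sub_matrix_mul number → Spec_inverse_byte_sub_matrix_mul number (inverse_byte_sub_matrix_mul number)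

-- ===== LEMMAS AND PROOFS =====
set_option maxRecDepth 100000 in
set_option maxHeartbeats 8000000 in
theorem pv_byte_eq : ∀ k < 256, inverse_byte_sub_matrix_mul (Int.ofNat k) = inverse_byte_sub_matrix_mul_alt (Int.ofNat k) := by decide

-- ===== VERDICT (by name: the statement is the Claim_ definition above) =====
theorem inverse_byte_sub_matrix_mul_spec : Claim_equal_inverse_byte_sub_matrix_mul := by
  intro n _ hpre
  unfold Spec_inverse_byte_sub_matrix_mul
  obtain ⟨h0, h1⟩ := hpre
  have hk : n = Int.ofNat n.toNat := (Int.toNat_of_nonneg h0).symm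
  rw [hk]
  exact pv_byte_eq n.toNat (by omega)
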